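-- pv_equiv track=rewrite | github.com/VISENDI56/iLuminara-Core | capacity_building/simulator.py | _generate_feedback_recommendations
-- ===== SOURCE A (Python) =====
-- from typing import Dict, List, Any, Optional, Tuple
--
-- def _generate_feedback_recommendations(insights: List[str]) -> List[str]:
--     """Generate actionable recommendations from feedback insights"""
--     recommendations = []
--
--     for insight in insights:
--         if 'training' in insight.lower():
--             recommendations.append("Expand multilingual training programs for health workers")
--         elif 'language' in insight.lower():
--             recommendations.append("Develop interfaces and materials in local languages")
--         elif 'access' in insight.lower():
--             recommendations.append("Improve mobile access and offline capabilities")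
--         elif 'integration' in insight.lower():
--             recommendations.append("Strengthen integration of traditional and modern medicine")
--
--     return recommendations
-- ===== SOURCE B (Python) =====
-- def _generate_feedback_recommendations(insights):
--     """Generate actionable recommendations from feedback insights"""
--     table = [
--         ('training', "Expand multilingual training programs for health workers"),
--         ('language', "Develop interfaces and materials in local languages"),
--         ('access', "Improve mobile access and offline capabilities"),
--         ('integration', "Strengthen integration of traditional and modern medicine"),
--     ]
--     # keyword-major passes: lowest-priority keyword first, higher-priority
--     # passes overwrite the slot; then compact the slot array.
--     slots = [None] * len(insights)
--     for keyword, rec in reversed(table):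
--         for i, insight in enumerate(insights):
--             if keyword in insight.lower():
--                 slots[i] = rec
--     return [rec for rec in slots if rec is not None]
-- ===== Notes on version B (the rewrite author's own statement) =====
-- stated objective: alternative
-- what changed: Replaces A's per-insight if/elif cascade with keyword-major passes: a slot array of len(insights) is filled by one sweep per keyword in reverse priority order so higher-priority passes overwrite, then the slots are compacted; no per-insight branch chain or first-match break remains.
import Mathlib
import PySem

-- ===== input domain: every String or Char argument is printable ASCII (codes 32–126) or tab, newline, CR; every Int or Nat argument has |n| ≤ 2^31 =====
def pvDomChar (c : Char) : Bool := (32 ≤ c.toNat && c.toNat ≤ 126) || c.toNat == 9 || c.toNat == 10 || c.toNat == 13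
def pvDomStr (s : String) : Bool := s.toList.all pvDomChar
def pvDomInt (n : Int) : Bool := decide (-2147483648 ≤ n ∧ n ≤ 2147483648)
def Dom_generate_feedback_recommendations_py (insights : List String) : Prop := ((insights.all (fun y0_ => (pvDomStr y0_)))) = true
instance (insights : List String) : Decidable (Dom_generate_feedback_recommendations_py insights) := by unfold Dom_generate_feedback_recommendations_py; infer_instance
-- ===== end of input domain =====

-- B replaces A's per-insight if/elif cascade with keyword-major overwrite passes over a slot
-- array (reverse priority order), then compacts the slots; same return value (alternative).


-- ===== PORT A =====
def generate_feedback_recommendations_py (insights : List String) : List String :=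
  insights.foldl (fun recommendations insight =>
    if PySem.Str.isIn "training" (PySem.Str.lower insight) then
      recommendations ++ ["Expand multilingual training programs for health workers"]
    else if PySem.Str.isIn "language" (PySem.Str.lower insight) then
      recommendations ++ ["Develop interfaces and materials in local languages"]
    else if PySem.Str.isIn "access" (PySem.Str.lower insight) then
      recommendations ++ ["Improve mobile access and offline capabilities"]
    else if PySem.Str.isIn "integration" (PySem.Str.lower insight) then
      recommendations ++ ["Strengthen integration of traditional and modern medicine"]
    else recommendations) []

-- ===== PORT B =====
def pvTable : List (String × String) :=
  [("training", "Expand multilingual training programs for health workers"),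
   ("language", "Develop interfaces and materials in local languages"),
   ("access", "Improve mobile access and offline capabilities"),
   ("integration", "Strengthen integration of traditional and modern medicine")]

-- one keyword-major pass: 'for i, insight in enumerate(insights): if keyword in insight.lower(): slots[i] = rec'
-- (enumerate indices are nonnegative and in range, so 'slots[i] = rec' is exactly List.set on p.1.toNat)
def pvPass (insights : List String) (keyword rec : String) (slots : List (Option String)) : List (Option String) :=
  (PySem.List.enumerate insights 0).foldl
    (fun sl p => if PySem.Str.isIn keyword (PySem.Str.lower p.2) then sl.set p.1.toNat (some rec) else sl)
    slots

def generate_feedback_recommendations_py_alt (insights : List String) : List String :=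
  -- slots = [None] * len(insights); for keyword, rec in reversed(table): <pass>; compact
  let slots0 : List (Option String) := List.replicate insights.length none
  let slots := pvTable.reverse.foldl (fun sl p => pvPass insights p.1 p.2 sl) slots0
  slots.filterMap id  -- [rec for rec in slots if rec is not None]

-- ===== PRECONDITION & SPEC =====
def Spec_generate_feedback_recommendations_py (insights : List String) (out : List String) : Prop := out = generate_feedback_recommendations_py_alt insights
instance (insights : List String) (out : List String) : Decidable (Spec_generate_feedback_recommendations_py insights out) := by unfold Spec_generate_feedback_recommendations_py; infer_instance

-- ===== CLAIM (what is proved, stated in full; the proofs are below) =====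
def Claim_equal_generate_feedback_recommendations_py : Prop := ∀ (insights : List String), Dom_generate_feedback_recommendations_py insights → Spec_generate_feedback_recommendations_py insights (generate_feedback_recommendations_py insights)

-- ===== LEMMAS AND PROOFS =====

def pvClassify (s : String) : Option String :=
  if PySem.Str.isIn "training" (PySem.Str.lower s) then
    some "Expand multilingual training programs for health workers"
  else if PySem.Str.isIn "language" (PySem.Str.lower s) then
    some "Develop interfaces and materials in local languages"
  else if PySem.Str.isIn "access" (PySem.Str.lower s) then
    some "Improve mobile access and offline capabilities"
  else if PySem.Str.isIn "integration" (PySem.Str.lower s) then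
    some "Strengthen integration of traditional and modern medicine"
  else none

lemma pvA_eq (insights : List String) :
    generate_feedback_recommendations_py insights = insights.filterMap pvClassify := by
  induction insights using List.reverseRecOn with
  | nil => rfl
  | append_singleton xs x ih =>
    unfold generate_feedback_recommendations_py at ih ⊢
    rw [List.foldl_append, List.filterMap_append, ih]
    simp only [List.foldl_cons, List.foldl_nil, List.filterMap_cons, List.filterMap_nil, pvClassify]
    split_ifs <;> simp

lemma pvPass_length (insights : List String) (keyword rec : String) (slots : List (Option String)) :
    (pvPass insights keyword rec slots).length = slots.length := by
  unfold pvPass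
  generalize PySem.List.enumerate insights 0 = l
  induction l generalizing slots with
  | nil => rfl
  | cons p l ih =>
    simp only [List.foldl_cons]
    rw [ih]
    split <;> simp

lemma pvPass_append_singleton (xs : List String) (x : String) (keyword rec : String)
    (slots : List (Option String)) :
    pvPass (xs ++ [x]) keyword rec slots =
      if PySem.Str.isIn keyword (PySem.Str.lower x) then
        (pvPass xs keyword rec slots).set xs.length (some rec)
      else pvPass xs keyword rec slots := by
  unfold pvPass
  rw [PySem.List.enumerate_append, List.foldl_append]
  simp [PySem.List.enumerate_cons]

lemma pvPass_getElem? (insights : List String) (keyword rec : String)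
    (slots : List (Option String)) (i : Nat) :
    (pvPass insights keyword rec slots)[i]? =
      if insights[i]?.any (fun s => PySem.Str.isIn keyword (PySem.Str.lower s)) then
        (slots.set i (some rec))[i]?
      else slots[i]? := by
  induction insights using List.reverseRecOn generalizing slots with
  | nil => simp [pvPass]
  | append_singleton xs x ih =>
    rw [pvPass_append_singleton]
    by_cases hm : PySem.Str.isIn keyword (PySem.Str.lower x) <;>
      rcases lt_trichotomy i xs.length with hi | hi | hi <;>
        simp_all [List.getElem?_set, List.getElem?_append, pvPass_length,
          ih, Nat.ne_of_lt, List.getElem?_eq_none, Nat.le_of_lt] <;>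
        try omega

lemma pv_slots (insights : List String) :
    pvTable.reverse.foldl (fun sl p => pvPass insights p.1 p.2 sl)
        (List.replicate insights.length (none : Option String)) =
      insights.map pvClassify := by
  rw [show pvTable.reverse =
      [("integration", "Strengthen integration of traditional and modern medicine"),
       ("access", "Improve mobile access and offline capabilities"),
       ("language", "Develop interfaces and materials in local languages"),
       ("training", "Expand multilingual training programs for health workers")] from rfl]
  simp only [List.foldl_cons, List.foldl_nil]
  apply List.ext_getElem?
  intro i
  simp only [pvPass_getElem?, List.getElem?_set, pvPass_length, List.length_replicate, List.getElem?_map, List.getElem?_replicate]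
  cases h : insights[i]? with
  | none =>
    have : ¬ i < insights.length := by
      intro hlt; exact absurd h (by simp [List.getElem?_eq_getElem hlt])
    simp [this]
  | some s =>
    have hlt : i < insights.length := by
      by_contra hge
      simp [List.getElem?_eq_none (by omega : insights.length ≤ i)] at h
    simp only [Option.any_some, hlt, if_true]
    unfold pvClassify
    split_ifs <;> simp_all

lemma pv_eq (insights : List String) :
    generate_feedback_recommendations_py insights = generate_feedback_recommendations_py_alt insights := by
  rw [pvA_eq]
  simp only [generate_feedback_recommendations_py_alt, pv_slots, List.filterMap_map,
    Function.id_comp]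

-- ===== VERDICT (by name: the statement is the Claim_ definition above) =====
theorem generate_feedback_recommendations_py_spec : Claim_equal_generate_feedback_recommendations_py := by
  intro insights _
  exact pv_eq insights
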